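-- pv_equiv track=rewrite | github.com/mkXultra/mew | src/mew/passive_bundle.py | first_non_empty_line
-- ===== SOURCE A (Python) =====
-- def strip_h1(markdown: str) -> str:
--     lines = markdown.splitlines()
--     if lines and lines[0].startswith("# "):
--         lines = lines[1:]
--         if lines and not lines[0].strip():
--             lines = lines[1:]
--     return "\n".join(lines).strip()
--
-- def first_non_empty_line(markdown: str) -> str:
--     fallback_heading = ""
--     for line in strip_h1(markdown).splitlines():
--         text = line.strip()
--         if not text:
--             continue
--         if text.startswith("#"):
--             fallback_heading = fallback_heading or text.lstrip("#").strip()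
--             continue
--         return text
--     return fallback_heading
-- ===== SOURCE B (Python) =====
-- def strip_h1(markdown: str) -> str:
--     lines = markdown.splitlines()
--     if lines and lines[0].startswith("# "):
--         lines = lines[1:]
--         if lines and not lines[0].strip():
--             lines = lines[1:]
--     return "\n".join(lines).strip()
--
-- def first_non_empty_line(markdown: str) -> str:
--     items = [t for t in (l.strip() for l in strip_h1(markdown).splitlines()) if t]
--     for t in items:
--         if not t.startswith("#"):
--             return t
--     for t in items:
--         h = t.lstrip("#").strip()
--         if h:
--             return h
--     return ""
-- ===== Notes on version B (the rewrite author's own statement) =====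
-- stated objective: simpler
-- what changed: Replaces the single loop threading a fallback_heading accumulator (with 'or' short-circuit reassignment) by building the list of stripped non-empty lines once and doing two direct scans: first non-heading line, else first heading with non-empty text after the '#'s.
import Mathlib
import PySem

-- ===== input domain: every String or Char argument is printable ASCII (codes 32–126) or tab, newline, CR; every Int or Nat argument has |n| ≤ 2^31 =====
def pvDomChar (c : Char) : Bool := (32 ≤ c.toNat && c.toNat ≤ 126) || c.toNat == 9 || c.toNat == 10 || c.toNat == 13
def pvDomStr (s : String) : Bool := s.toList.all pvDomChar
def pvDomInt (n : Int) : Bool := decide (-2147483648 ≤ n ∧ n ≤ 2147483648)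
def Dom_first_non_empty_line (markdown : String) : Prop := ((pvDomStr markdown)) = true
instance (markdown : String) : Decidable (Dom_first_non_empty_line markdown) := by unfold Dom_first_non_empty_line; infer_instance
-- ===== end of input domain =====

-- B replaces A's single loop threading a fallback accumulator by two direct scans over the stripped non-empty lines (simpler decomposition, same cost).


-- ===== PORT A =====
-- hand port of text.lstrip("#"): drop leading '#' code points (exact for an explicit char set)
def pvLstripHash (t : String) : String := String.mk (t.toList.dropWhile (· == '#'))

-- helper strip_h1, identical in A's and B's Python
def strip_h1 (markdown : String) : String :=
  let lines := PySem.Str.splitlines markdown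
  let lines :=
    match lines with
    | [] => lines
    | l0 :: rest =>
      if PySem.Str.startswith l0 "# " then
        match rest with
        | [] => rest
        | l1 :: rest2 => if PySem.Str.strip l1 = "" then rest2 else rest
      else lines
  PySem.Str.strip (PySem.Str.join "\n" lines)

-- A's for-loop with the fallback_heading accumulator ('fb or x' ported as 'if fb ≠ "" then fb else x')
def pvGoA : List String → String → String
  | [], fb => fb
  | line :: rest, fb =>
    let text := PySem.Str.strip line
    if text = "" then pvGoA rest fb
    else if PySem.Str.startswith text "#" then
      pvGoA rest (if fb ≠ "" then fb else PySem.Str.strip (pvLstripHash text))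
    else text

def first_non_empty_line (markdown : String) : String :=
  pvGoA (PySem.Str.splitlines (strip_h1 markdown)) ""

-- ===== PORT B =====
def first_non_empty_line_alt (markdown : String) : String :=
  let items := ((PySem.Str.splitlines (strip_h1 markdown)).map PySem.Str.strip).filter (fun t => t ≠ "")
  match items.find? (fun t => !PySem.Str.startswith t "#") with
  | some t => t
  | none =>
    (items.findSome? (fun t =>
        let h := PySem.Str.strip (pvLstripHash t)
        if h = "" then none else some h)).getD ""

-- ===== PRECONDITION & SPEC =====
def Spec_first_non_empty_line (markdown : String) (out : String) : Prop := out = first_non_empty_line_alt markdown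
instance (markdown : String) (out : String) : Decidable (Spec_first_non_empty_line markdown out) := by unfold Spec_first_non_empty_line; infer_instance

-- ===== CLAIM (what is proved, stated in full; the proofs are below) =====
def Claim_equal_first_non_empty_line : Prop := ∀ (markdown : String), Dom_first_non_empty_line markdown → Spec_first_non_empty_line markdown (first_non_empty_line markdown)

-- ===== LEMMAS AND PROOFS =====

-- B's two scans, with the fallback made a parameter (fb = "" gives B's body)
def pvScan (items : List String) (fb : String) : String :=
  match items.find? (fun t => !PySem.Str.startswith t "#") with
  | some t => t
  | none =>
    if fb = "" then
      (items.findSome? (fun t =>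
          let h := PySem.Str.strip (pvLstripHash t)
          if h = "" then none else some h)).getD ""
    else fb

lemma pvScan_cons_heading (t : String) (items : List String) (fb : String)
    (h1 : PySem.Str.startswith t "#" = true) :
    pvScan (t :: items) fb =
      pvScan items (if fb ≠ "" then fb else PySem.Str.strip (pvLstripHash t)) := by
  unfold pvScan
  rw [List.find?_cons_of_neg (by simpa using h1), List.findSome?_cons]
  cases hfind : List.find? (fun t => !PySem.Str.startswith t "#") items with
  | some t' => rfl
  | none =>
    by_cases hfb : fb = ""
    · subst hfb
      by_cases hh : PySem.Str.strip (pvLstripHash t) = ""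
      · simp [hh]
      · simp [hh]
    · simp [hfb]

lemma pvGoA_eq (lines : List String) (fb : String) :
    pvGoA lines fb = pvScan ((lines.map PySem.Str.strip).filter (fun t => t ≠ "")) fb := by
  induction lines generalizing fb with
  | nil => simp [pvGoA, pvScan]
  | cons l rest ih =>
    simp only [pvGoA, List.map_cons, List.filter_cons]
    by_cases h0 : PySem.Str.strip l = ""
    · simpa [h0] using ih fb
    · rw [if_neg h0]
      have hfil : (decide (PySem.Str.strip l ≠ "")) = true := by simpa using h0
      rw [hfil, if_pos rfl]
      by_cases h1 : PySem.Str.startswith (PySem.Str.strip l) "#"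
      · rw [if_pos h1, pvScan_cons_heading _ _ _ h1, ih]
      · rw [if_neg h1]
        unfold pvScan
        rw [List.find?_cons_of_pos (by simpa using h1)]

lemma pvScan_empty_fb (items : List String) :
    pvScan items "" =
      (match items.find? (fun t => !PySem.Str.startswith t "#") with
       | some t => t
       | none =>
         (items.findSome? (fun t =>
             let h := PySem.Str.strip (pvLstripHash t)
             if h = "" then none else some h)).getD "") := by
  unfold pvScan
  cases items.find? (fun t => !PySem.Str.startswith t "#") with
  | some t => rfl
  | none => simp

-- ===== VERDICT (by name: the statement is the Claim_ definition above) =====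
theorem first_non_empty_line_spec : Claim_equal_first_non_empty_line := by
  intro markdown _
  unfold Spec_first_non_empty_line
  simp only [first_non_empty_line, first_non_empty_line_alt]
  rw [pvGoA_eq, pvScan_empty_fb]
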